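-- pv_equiv track=rewrite | github.com/LucianoSantantonio/TESIS | Resultados Calidad Voces, IC95.py | parse_string_data
-- ===== SOURCE A (Python) =====
-- def parse_string_data(s):
--     """
--     Analiza una cadena de dígitos, tratando '10' como un solo número
--     y todos los demás dígitos como números individuales.
--     """
--     data_list = []
--     i = 0
--     while i < len(s):
--         # Comprueba si es '10'
--         if s[i] == '1' and i + 1 < len(s) and s[i+1] == '0':
--             data_list.append(10)
--             i += 2  # Salta ambos '1' y '0'
--         # Maneja los otros dígitos
--         else:
--             data_list.append(int(s[i]))
--             i += 1
--     return tuple(data_list) # Convierte a tupla para mantener el formato original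
-- ===== SOURCE B (Python) =====
-- def parse_string_data(s):
--     """
--     Analiza una cadena de digitos tratando '10' como un solo numero,
--     via str.split: las ocurrencias no solapadas de '10' que encuentra
--     str.split son exactamente las que consume el escaneo voraz de A.
--     """
--     parts = s.split('10')
--     out = [int(c) for c in parts[0]]
--     for part in parts[1:]:
--         out.append(10)
--         out.extend(int(c) for c in part)
--     return tuple(out)
-- ===== Notes on version B (the rewrite author's own statement) =====
-- stated objective: idiomatic
-- what changed: Replaces A's index-based while loop with a two-character lookahead by str.split on the one-zero token followed by a per-piece single-digit conversion, relying on split's left-to-right non-overlapping scan coinciding with A's greedy lookahead.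
import Mathlib
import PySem

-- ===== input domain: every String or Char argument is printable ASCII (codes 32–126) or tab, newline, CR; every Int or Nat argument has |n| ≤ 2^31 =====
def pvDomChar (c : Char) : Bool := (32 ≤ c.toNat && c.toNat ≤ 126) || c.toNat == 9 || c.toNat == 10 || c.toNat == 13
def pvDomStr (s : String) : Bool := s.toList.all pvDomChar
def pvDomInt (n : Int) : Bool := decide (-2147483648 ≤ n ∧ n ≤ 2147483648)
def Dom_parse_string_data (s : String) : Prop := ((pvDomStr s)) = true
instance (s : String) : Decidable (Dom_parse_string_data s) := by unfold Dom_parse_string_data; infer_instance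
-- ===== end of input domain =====

-- B replaces A's index-and-lookahead while loop by str.split on the one-zero token and a per-piece
-- digit conversion (objective: idiomatic); return values proved equal on all-digit strings.

-- ===== PORT A =====
-- int(s[i]) for a single char; Pre_ guarantees the char is a digit, so getD 0 is never the raising case
def pvIntChar (c : Char) : Int := (PySem.Int.ofChars? [c]).getD 0

-- A's while loop: at index i, if s[i]=='1' and s[i+1]=='0' take 10 and skip two, else int(s[i]) and skip one
def pvGoA : List Char → List Int
  | [] => []
  | '1' :: '0' :: cs => 10 :: pvGoA cs
  | c :: cs => pvIntChar c :: pvGoA cs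

def parse_string_data (s : String) : List Int := pvGoA s.toList

-- ===== PORT B =====
-- [int(c) for c in part]
def pvDigits (cs : List Char) : List Int := cs.map pvIntChar

-- parts = s.split('10'); out = digits(parts[0]); for part in parts[1:]: out.append(10); out.extend(digits(part))
def parse_string_data_alt (s : String) : List Int :=
  let parts := PySem.Chars.splitOn s.toList ['1', '0']
  (parts.drop 1).foldl (fun acc part => acc ++ 10 :: pvDigits part) (pvDigits (parts.headD []))

-- ===== PRECONDITION & SPEC =====
-- Pre_ excludes exactly the strings containing a non-digit character, on which Python's int() raises ValueError in both A and B.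
def Pre_parse_string_data (s : String) : Prop := s.toList.all PySem.Chars.isdigit = true
instance (s : String) : Decidable (Pre_parse_string_data s) := by unfold Pre_parse_string_data; infer_instance
def pvWitness_parse_string_data : String := "9102103"

def Spec_parse_string_data (s : String) (out : List Int) : Prop := out = parse_string_data_alt s
instance (s : String) (out : List Int) : Decidable (Spec_parse_string_data s out) := by unfold Spec_parse_string_data; infer_instance

-- ===== CLAIM (what is proved, stated in full; the proofs are below) =====
def Claim_equal_parse_string_data : Prop := ∀ (s : String), Dom_parse_string_data s → Pre_parse_string_data s → Spec_parse_string_data s (parse_string_data s)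

-- ===== LEMMAS AND PROOFS =====

-- head and tail of the pieces '10'-splitting leaves, as one clean recursion
def pvSplit10 : List Char → List Char × List (List Char)
  | [] => ([], [])
  | '1' :: '0' :: cs => ([], (pvSplit10 cs).1 :: (pvSplit10 cs).2)
  | c :: cs => (c :: (pvSplit10 cs).1, (pvSplit10 cs).2)

theorem pvGo_spec (fuel : Nat) (l cur : List Char) (acc : List (List Char))
    (h : l.length < fuel) :
    PySem.Chars.splitOn.go ['1', '0'] fuel l cur acc =
      acc.reverse ++ (cur.reverse ++ (pvSplit10 l).1) :: (pvSplit10 l).2 := by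
  induction fuel generalizing l cur acc with
  | zero => omega
  | succ f ih =>
    match l with
    | [] => simp [PySem.Chars.splitOn.go, pvSplit10]
    | c :: rest =>
      by_cases hp : (['1', '0'] : List Char).isPrefixOf (c :: rest) = true
      · obtain ⟨c1, r', hr⟩ : c = '1' ∧ ∃ r', rest = '0' :: r' := by
          cases rest with
          | nil => simp [List.isPrefixOf] at hp
          | cons d r => simp [List.isPrefixOf] at hp; exact ⟨hp.1.symm, r, by rw [← hp.2]⟩
        subst c1; subst hr
        rw [show PySem.Chars.splitOn.go ['1','0'] (f+1) ('1' :: '0' :: r') cur acc =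
              PySem.Chars.splitOn.go ['1','0'] f r' [] (cur.reverse :: acc) by
            simp [PySem.Chars.splitOn.go, List.isPrefixOf]]
        rw [ih r' [] (cur.reverse :: acc) (by simp at h; omega)]
        simp [pvSplit10]
      · rw [show PySem.Chars.splitOn.go ['1','0'] (f+1) (c :: rest) cur acc =
              PySem.Chars.splitOn.go ['1','0'] f rest (c :: cur) acc by
            simp [PySem.Chars.splitOn.go, hp]]
        rw [ih rest (c :: cur) acc (by simp at h; omega)]
        have hcase : pvSplit10 (c :: rest) = (c :: (pvSplit10 rest).1, (pvSplit10 rest).2) := by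
          rw [pvSplit10.eq_def]
          split
          · simp_all
          · rename_i heq
            injection heq with h1 h2
            subst h1; subst h2
            simp [List.isPrefixOf] at hp
          · rename_i heq
            injection heq with h1 h2
            subst h1; subst h2
            rfl
        rw [hcase]
        simp

theorem pvSplitOn_eq (l : List Char) :
    PySem.Chars.splitOn l ['1', '0'] = (pvSplit10 l).1 :: (pvSplit10 l).2 := by
  rw [PySem.Chars.splitOn, pvGo_spec (l.length + 1) l [] [] (by omega)]
  simp

theorem pvFold_acc (ps : List (List Char)) (init : List Int) :
    ps.foldl (fun acc part => acc ++ 10 :: pvDigits part) init =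
      init ++ ps.flatMap (fun p => 10 :: pvDigits p) := by
  induction ps generalizing init with
  | nil => simp
  | cons p ps ih => simp [List.foldl_cons, ih, List.flatMap_cons]

theorem pvGoA_eq (l : List Char) :
    pvGoA l = pvDigits (pvSplit10 l).1 ++ ((pvSplit10 l).2).flatMap (fun p => 10 :: pvDigits p) := by
  induction l using pvGoA.induct with
  | case1 => simp [pvGoA, pvSplit10, pvDigits]
  | case2 cs ih => simp [pvGoA, pvSplit10, pvDigits, ih]
  | case3 c cs h ih => simp_all [pvGoA, pvSplit10, pvDigits]

-- ===== VERDICT (by name: the statement is the Claim_ definition above) =====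
theorem parse_string_data_spec : Claim_equal_parse_string_data := by
  intro s _ _
  unfold Spec_parse_string_data parse_string_data parse_string_data_alt
  rw [pvSplitOn_eq]
  simp only [List.headD, List.drop_succ_cons, List.drop_zero]
  rw [pvFold_acc, pvGoA_eq]
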